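-- pv_equiv track=rewrite | github.com/noSkcaHdat/hackson-projects | tools/site_content.py | split_cta_groups
-- ===== SOURCE A (Python) =====
-- def split_cta_groups(text: str) -> list[str]:
--     groups: list[str] = []
--     for char in text:
--         if char == "'" and groups:
--             groups[-1] += char
--         else:
--             groups.append(char)
--     return groups
-- ===== SOURCE B (Python) =====
-- def split_cta_groups(text: str) -> list[str]:
--     groups: list[str] = []
--     i, n = 0, len(text)
--     while i < n:
--         j = i + 1
--         while j < n and text[j] == "'":
--             j += 1
--         groups.append(text[i:j])
--         i = j
--     return groups
-- ===== Notes on version B (the rewrite author's own statement) =====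
-- stated objective: alternative
-- what changed: A appends one-character groups and mutates the last group to attach apostrophes; B is a forward tokenizer that consumes one character plus its whole run of following apostrophes per step, so no group is ever revisited.
import Mathlib
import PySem

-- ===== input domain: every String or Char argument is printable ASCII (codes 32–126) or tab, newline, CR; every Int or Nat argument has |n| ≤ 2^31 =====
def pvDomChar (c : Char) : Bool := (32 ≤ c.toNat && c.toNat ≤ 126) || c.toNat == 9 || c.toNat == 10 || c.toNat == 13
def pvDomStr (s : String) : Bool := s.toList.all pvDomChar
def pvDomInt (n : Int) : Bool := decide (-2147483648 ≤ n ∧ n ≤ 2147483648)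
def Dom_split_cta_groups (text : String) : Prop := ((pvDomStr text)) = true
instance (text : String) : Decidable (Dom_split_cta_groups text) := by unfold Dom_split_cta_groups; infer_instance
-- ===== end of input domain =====

-- B replaces A's append-and-mutate-last loop by a forward tokenizer consuming a char plus its apostrophe run (alternative decomposition, same cost).

-- ===== PORT A =====
-- one fold step: `if char == "'" and groups: groups[-1] += char else: groups.append(char)`
def pvStepA (groups : List String) (char : Char) : List String :=
  if char = '\'' ∧ groups ≠ [] then
    groups.dropLast ++ [groups.getLast! ++ char.toString]
  else
    groups ++ [char.toString]

def split_cta_groups (text : String) : List String :=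
  text.toList.foldl pvStepA []

-- ===== PORT B =====
-- tokenizer: take text[i], then the run of apostrophes text[i+1:j], recurse on the rest
def pvAltGo : List Char → List String
  | [] => []
  | c :: rest =>
    String.ofList (c :: rest.takeWhile (· = '\'')) :: pvAltGo (rest.dropWhile (· = '\''))
termination_by cs => cs.length
decreasing_by
  simp only [List.length_cons]
  exact Nat.lt_succ_of_le (List.length_dropWhile_le _ _)

def split_cta_groups_alt (text : String) : List String :=
  pvAltGo text.toList

-- ===== PRECONDITION & SPEC =====
def Spec_split_cta_groups (text : String) (out : List String) : Prop := out = split_cta_groups_alt text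
instance (text : String) (out : List String) : Decidable (Spec_split_cta_groups text out) := by unfold Spec_split_cta_groups; infer_instance

-- ===== CLAIM (what is proved, stated in full; the proofs are below) =====
def Claim_equal_split_cta_groups : Prop := ∀ (text : String), Dom_split_cta_groups text → Spec_split_cta_groups text (split_cta_groups text)

-- ===== LEMMAS AND PROOFS =====

theorem pvOfList_cons (c : Char) (l : List Char) :
    String.singleton c ++ String.ofList l = String.ofList (c :: l) := by
  apply String.toList_inj.mp
  simp

theorem pvAppend_char_ofList (s : String) (c : Char) (l : List Char) :
    s ++ c.toString ++ String.ofList l = s ++ String.ofList (c :: l) := by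
  rw [String.append_assoc, Char.toString_eq_singleton, pvOfList_cons]

theorem pvFold_append_singleton (cs : List Char) (acc : List String) (s : String) :
    cs.foldl pvStepA (acc ++ [s]) =
      acc ++ [s ++ String.ofList (cs.takeWhile (· = '\''))]
        ++ pvAltGo (cs.dropWhile (· = '\'')) := by
  induction cs generalizing acc s with
  | nil => simp [pvAltGo]
  | cons c rest ih =>
    rw [List.foldl_cons]
    by_cases hc : c = '\''
    · subst hc
      rw [show pvStepA (acc ++ [s]) '\'' = acc ++ [s ++ ('\'').toString] from by
            simp [pvStepA],
          ih, pvAppend_char_ofList]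
      simp
    · rw [show pvStepA (acc ++ [s]) c = (acc ++ [s]) ++ [c.toString] from by
            simp [pvStepA, hc],
          ih, Char.toString_eq_singleton, pvOfList_cons]
      simp [pvAltGo, hc]

theorem pvPorts_agree (text : String) : split_cta_groups text = split_cta_groups_alt text := by
  unfold split_cta_groups split_cta_groups_alt
  cases hcs : text.toList with
  | nil => simp [pvAltGo]
  | cons c rest =>
    rw [List.foldl_cons,
        show pvStepA [] c = [] ++ [c.toString] from by simp [pvStepA],
        pvFold_append_singleton, Char.toString_eq_singleton, pvOfList_cons]
    simp [pvAltGo]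

-- ===== VERDICT (by name: the statement is the Claim_ definition above) =====
theorem split_cta_groups_spec : Claim_equal_split_cta_groups := by
  intro text _
  unfold Spec_split_cta_groups
  exact pvPorts_agree text
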